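-- pv_equiv track=rewrite | github.com/c41-gg/Pantasa | app/predefined_rules/hyphen_rule.py | detect_onomatopoeia
-- ===== SOURCE A (Python) =====
-- def is_consonant(char):
--     """ Check if the character is a consonant. """
--     return char.lower() in "bcdfghjklmnpqrstvwxyz"
--
-- def is_vowel(char):
--     """ Check if the character is a vowel. """
--     return char.lower() in "aeiou"
--
-- def detect_onomatopoeia(word):
--     """
--     Detect onomatopoeia, handling both hyphenated and non-hyphenated consonant-vowel pairs.
--     Example: "tik-tak", "ding-dong", "plip-plap", "rat-ta-ta", and "taktak" -> "tak-tak".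
--     """
--     # Handle the hyphenated onomatopoeia case (e.g., "tik-tak", "ding-dong")
--     if '-' in word:
--         parts = word.split('-')
--         if all(len(part) == 3 for part in parts) and len(parts) in [2, 3]:  # Handle patterns like "tik-tak" and "rat-ta-ta"
--             if all(is_consonant(part[0]) and is_vowel(part[1]) and is_consonant(part[2]) for part in parts):
--                 return True
--     # Handle attached consonant-vowel pairs (e.g., "taktak" -> "tak-tak")
--     if len(word) == 6 and word[:3] == word[3:]:
--         if is_consonant(word[0]) and is_vowel(word[1]) and is_consonant(word[2]):
--             return True
--
--     return False
-- ===== SOURCE B (Python) =====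
-- def is_consonant(char):
--     """ Check if the character is a consonant. """
--     return char.lower() in "bcdfghjklmnpqrstvwxyz"
--
-- def is_vowel(char):
--     """ Check if the character is a vowel. """
--     return char.lower() in "aeiou"
--
-- def detect_onomatopoeia(word):
--     """Positional scan: a hyphenated onomatopoeia is exactly 7 or 11 chars with
--     class C,V,C,-,C,V,C(,-,C,V,C) by index mod 4; plus the attached doubled triple."""
--     n = len(word)
--     if n in (7, 11) and all(
--             (c == '-') if i % 4 == 3 else
--             is_vowel(c) if i % 4 == 1 else
--             is_consonant(c)
--             for i, c in enumerate(word)):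
--         return True
--     return (n == 6 and word[:3] == word[3:]
--             and is_consonant(word[0]) and is_vowel(word[1]) and is_consonant(word[2]))
-- ===== Notes on version B (the rewrite author's own statement) =====
-- stated objective: alternative
-- what changed: Replaces A's split-on-hyphen pass with its per-part length/count/CVC checks by a single positional scan: the hyphenated case holds iff the word has length 7 or 11 and each character's class (consonant / vowel / hyphen) is determined by its index mod 4; the attached doubled-triple check is kept.
import Mathlib
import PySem

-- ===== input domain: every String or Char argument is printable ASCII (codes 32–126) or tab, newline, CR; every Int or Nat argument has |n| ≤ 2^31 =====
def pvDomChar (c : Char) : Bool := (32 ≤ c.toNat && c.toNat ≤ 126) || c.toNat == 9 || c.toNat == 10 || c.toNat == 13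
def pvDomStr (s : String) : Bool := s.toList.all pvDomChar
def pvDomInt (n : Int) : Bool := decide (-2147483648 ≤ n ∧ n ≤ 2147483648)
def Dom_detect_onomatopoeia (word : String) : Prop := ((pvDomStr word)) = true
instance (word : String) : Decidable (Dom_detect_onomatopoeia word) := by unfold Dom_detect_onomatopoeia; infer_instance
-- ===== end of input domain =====

-- B replaces A's split-on-hyphen pass by a single positional scan (index mod 4 decides the
-- required character class); same O(n) cost, a different (alternative) algorithm.

-- ===== PORT A =====
-- char.lower() in "bcdfghjklmnpqrstvwxyz": a one-char 'in' on a string is membership, exact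
def is_consonant (c : Char) : Bool := "bcdfghjklmnpqrstvwxyz".toList.contains (PySem.Chars.lowerChar c)
def is_vowel (c : Char) : Bool := "aeiou".toList.contains (PySem.Chars.lowerChar c)

-- literal transliteration of A; part[0]/part[1]/part[2] are only evaluated after the
-- len(part) == 3 guard holds, so the in-range pyGetD default ' ' is never used
def detect_onomatopoeia (word : String) : Bool :=
  let l := word.toList
  if (if l.contains '-' then
        let parts := PySem.Chars.splitOn l ['-']
        (parts.all fun p => p.length == 3) && (parts.length == 2 || parts.length == 3) &&
          (parts.all fun p =>
            is_consonant (PySem.List.pyGetD p 0 ' ') && is_vowel (PySem.List.pyGetD p 1 ' ') &&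
              is_consonant (PySem.List.pyGetD p 2 ' '))
      else false) then true
  else
    if (l.length == 6 && (PySem.List.slice l none (some 3) == PySem.List.slice l (some 3) none)) &&
        (is_consonant (PySem.List.pyGetD l 0 ' ') && is_vowel (PySem.List.pyGetD l 1 ' ') &&
          is_consonant (PySem.List.pyGetD l 2 ' ')) then true
    else false

-- ===== PORT B =====
-- literal transliteration of Source B: length gate, then one enumerate pass with the required
-- class chosen by index mod 4, then the attached doubled-triple case
def detect_onomatopoeia_alt (word : String) : Bool :=
  let l := word.toList
  let n := l.length
  if (n == 7 || n == 11) &&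
      (PySem.List.enumerate l 0).all (fun ic =>
        if PySem.Int.mod ic.1 4 == 3 then ic.2 == '-'
        else if PySem.Int.mod ic.1 4 == 1 then is_vowel ic.2
        else is_consonant ic.2) then true
  else
    (n == 6 && (PySem.List.slice l none (some 3) == PySem.List.slice l (some 3) none)) &&
      (is_consonant (PySem.List.pyGetD l 0 ' ') && is_vowel (PySem.List.pyGetD l 1 ' ') &&
        is_consonant (PySem.List.pyGetD l 2 ' '))

-- ===== PRECONDITION & SPEC =====
def Spec_detect_onomatopoeia (word : String) (out : Bool) : Prop := out = detect_onomatopoeia_alt word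
instance (word : String) (out : Bool) : Decidable (Spec_detect_onomatopoeia word out) := by unfold Spec_detect_onomatopoeia; infer_instance

-- ===== CLAIM (what is proved, stated in full; the proofs are below) =====
def Claim_equal_detect_onomatopoeia : Prop := ∀ (word : String), Dom_detect_onomatopoeia word → Spec_detect_onomatopoeia word (detect_onomatopoeia word)

-- ===== LEMMAS AND PROOFS =====

-- proof-side names of the two hyphen-branch conditions and the shared attached-case condition
def pvPA (l : List Char) : Bool :=
  if l.contains '-' then
    let parts := PySem.Chars.splitOn l ['-']
    (parts.all fun p => p.length == 3) && (parts.length == 2 || parts.length == 3) &&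
      (parts.all fun p =>
        is_consonant (PySem.List.pyGetD p 0 ' ') && is_vowel (PySem.List.pyGetD p 1 ' ') &&
          is_consonant (PySem.List.pyGetD p 2 ' '))
  else false

def pvPB (l : List Char) : Bool :=
  (l.length == 7 || l.length == 11) &&
    (PySem.List.enumerate l 0).all (fun ic =>
      if PySem.Int.mod ic.1 4 == 3 then ic.2 == '-'
      else if PySem.Int.mod ic.1 4 == 1 then is_vowel ic.2
      else is_consonant ic.2)

def pvSA (l : List Char) : Bool :=
  (l.length == 6 && (PySem.List.slice l none (some 3) == PySem.List.slice l (some 3) none)) &&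
    (is_consonant (PySem.List.pyGetD l 0 ' ') && is_vowel (PySem.List.pyGetD l 1 ' ') &&
      is_consonant (PySem.List.pyGetD l 2 ' '))

def pvSplit : List Char → List (List Char)
  | [] => [[]]
  | c :: t => if c = '-' then [] :: pvSplit t else (pvSplit t).modifyHead (c :: ·)

def pvCVC (a b c : Char) : Prop :=
  is_consonant a = true ∧ is_vowel b = true ∧ is_consonant c = true

def pvShape (l : List Char) : Prop :=
  (∃ a b c d e f, l = [a,b,c,'-',d,e,f] ∧ pvCVC a b c ∧ pvCVC d e f) ∨
  (∃ a b c d e f g h i, l = [a,b,c,'-',d,e,f,'-',g,h,i] ∧ pvCVC a b c ∧ pvCVC d e f ∧ pvCVC g h i)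

lemma pvSplit_ne_nil (l : List Char) : pvSplit l ≠ [] := by
  induction l with
  | nil => simp [pvSplit]
  | cons c t ih =>
    by_cases h : c = '-' <;> simp [pvSplit, h]
    cases hs : pvSplit t with
    | nil => exact absurd hs ih
    | cons p ps => simp

lemma pvGo_eq (l : List Char) : ∀ (fuel : Nat) (acc : List (List Char)) (cur' : List Char),
    l.length < fuel →
    PySem.Chars.splitOn.go ['-'] fuel l cur' acc
      = acc.reverse ++ (pvSplit l).modifyHead (cur'.reverse ++ ·) := by
  induction l with
  | nil =>
    intro fuel acc cur' h
    cases fuel with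
    | zero => omega
    | succ f => simp [PySem.Chars.splitOn.go, pvSplit, List.modifyHead]
  | cons c t ih =>
    intro fuel acc cur' h
    cases fuel with
    | zero => omega
    | succ f =>
      by_cases hc : c = '-'
      · subst hc
        rw [show PySem.Chars.splitOn.go ['-'] (f+1) ('-' :: t) cur' acc
              = PySem.Chars.splitOn.go ['-'] f t [] (cur'.reverse :: acc) from by
            simp [PySem.Chars.splitOn.go, List.isPrefixOf]]
        rw [ih f (cur'.reverse :: acc) [] (by simpa using Nat.lt_of_succ_lt_succ h)]
        cases hs : pvSplit t with
        | nil => exact absurd hs (pvSplit_ne_nil t)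
        | cons p ps => simp [pvSplit, List.modifyHead, hs]
      · rw [show PySem.Chars.splitOn.go ['-'] (f+1) (c :: t) cur' acc
              = PySem.Chars.splitOn.go ['-'] f t (c :: cur') acc from by
            simp [PySem.Chars.splitOn.go, List.isPrefixOf, Ne.symm hc]]
        rw [ih f acc (c :: cur') (by simpa using Nat.lt_of_succ_lt_succ h)]
        cases hs : pvSplit t with
        | nil => exact absurd hs (pvSplit_ne_nil t)
        | cons p ps => simp [pvSplit, hc, List.modifyHead, hs]

lemma pvSplitOn_eq (l : List Char) : PySem.Chars.splitOn l ['-'] = pvSplit l := by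
  rw [PySem.Chars.splitOn, pvGo_eq l (l.length+1) [] [] (by omega)]
  cases hs : pvSplit l with
  | nil => exact absurd hs (pvSplit_ne_nil l)
  | cons p ps => simp

def pvJoin : List (List Char) → List Char
  | [] => []
  | [p] => p
  | p :: q :: r => p ++ '-' :: pvJoin (q :: r)

lemma pvJoin_pvSplit (l : List Char) : pvJoin (pvSplit l) = l := by
  induction l with
  | nil => simp [pvSplit, pvJoin]
  | cons c t ih =>
    by_cases hc : c = '-'
    · subst hc
      cases hs : pvSplit t with
      | nil => exact absurd hs (pvSplit_ne_nil t)
      | cons p ps => simp [pvSplit, pvJoin, hs]; rw [← hs, ih]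
    · cases hs : pvSplit t with
      | nil => exact absurd hs (pvSplit_ne_nil t)
      | cons p ps =>
        rw [pvSplit, if_neg hc, hs, List.modifyHead]
        cases ps with
        | nil => simp_all [pvJoin]
        | cons q r => simp_all [pvJoin]

lemma cons_ne (x : Char) (h : is_consonant x = true) : x ≠ '-' := by
  rintro rfl; exact absurd h (by decide)
lemma vow_ne (x : Char) (h : is_vowel x = true) : x ≠ '-' := by
  rintro rfl; exact absurd h (by decide)

lemma pvPA_iff (l : List Char) : pvPA l = true ↔ pvShape l := by
  constructor
  · intro h
    rw [pvPA] at h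
    split at h
    case isFalse => exact absurd h (by simp)
    case isTrue hcont =>
      simp only [pvSplitOn_eq, Bool.and_eq_true, Bool.or_eq_true, List.all_eq_true,
        beq_iff_eq] at h
      obtain ⟨⟨hlen3, hcount⟩, hcvc⟩ := h
      have hjoin := pvJoin_pvSplit l
      rcases hcount with h2 | h2
      · obtain ⟨p, q, hpq⟩ := List.length_eq_two.mp h2
        rw [hpq] at hlen3 hcvc hjoin
        obtain ⟨a, b, c, rfl⟩ := List.length_eq_three.mp (hlen3 p (by simp))
        obtain ⟨d, e, f, rfl⟩ := List.length_eq_three.mp (hlen3 q (by simp))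
        have h1 := hcvc [a,b,c] (by simp)
        have h2' := hcvc [d,e,f] (by simp)
        simp [PySem.List.pyGetD, PySem.List.pyGet?, PySem.List.pyIdx?] at h1 h2'
        exact Or.inl ⟨a,b,c,d,e,f, by rw [← hjoin]; simp [pvJoin],
          ⟨h1.1.1, h1.1.2, h1.2⟩, ⟨h2'.1.1, h2'.1.2, h2'.2⟩⟩
      · obtain ⟨p, q, r, hpq⟩ := List.length_eq_three.mp h2
        rw [hpq] at hlen3 hcvc hjoin
        obtain ⟨a, b, c, rfl⟩ := List.length_eq_three.mp (hlen3 p (by simp))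
        obtain ⟨d, e, f, rfl⟩ := List.length_eq_three.mp (hlen3 q (by simp))
        obtain ⟨g, hh, i, rfl⟩ := List.length_eq_three.mp (hlen3 r (by simp))
        have h1 := hcvc [a,b,c] (by simp)
        have h2' := hcvc [d,e,f] (by simp)
        have h3 := hcvc [g,hh,i] (by simp)
        simp [PySem.List.pyGetD, PySem.List.pyGet?, PySem.List.pyIdx?] at h1 h2' h3
        exact Or.inr ⟨a,b,c,d,e,f,g,hh,i, by rw [← hjoin]; simp [pvJoin],
          ⟨h1.1.1, h1.1.2, h1.2⟩, ⟨h2'.1.1, h2'.1.2, h2'.2⟩, ⟨h3.1.1, h3.1.2, h3.2⟩⟩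
  · rintro (⟨a,b,c,d,e,f, rfl, ⟨ha,hb,hc⟩, ⟨hd,he,hf⟩⟩ |
            ⟨a,b,c,d,e,f,g,hh,i, rfl, ⟨ha,hb,hc⟩, ⟨hd,he,hf⟩, ⟨hg,hhh,hi⟩⟩)
    · have hsplit : pvSplit [a,b,c,'-',d,e,f] = [[a,b,c],[d,e,f]] := by
        simp [pvSplit, cons_ne _ ha, vow_ne _ hb, cons_ne _ hc, cons_ne _ hd, vow_ne _ he,
          cons_ne _ hf]
      rw [pvPA, if_pos (by simp)]
      simp [pvSplitOn_eq, hsplit, PySem.List.pyGetD, PySem.List.pyGet?, PySem.List.pyIdx?,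
        ha, hb, hc, hd, he, hf]
    · have hsplit : pvSplit [a,b,c,'-',d,e,f,'-',g,hh,i] = [[a,b,c],[d,e,f],[g,hh,i]] := by
        simp [pvSplit, cons_ne _ ha, vow_ne _ hb, cons_ne _ hc, cons_ne _ hd, vow_ne _ he,
          cons_ne _ hf, cons_ne _ hg, vow_ne _ hhh, cons_ne _ hi]
      rw [pvPA, if_pos (by simp)]
      simp [pvSplitOn_eq, hsplit, PySem.List.pyGetD, PySem.List.pyGet?, PySem.List.pyIdx?,
        ha, hb, hc, hd, he, hf, hg, hhh, hi]

lemma pvLen7 (l : List Char) (h : l.length = 7) : ∃ a b c d e f g, l = [a,b,c,d,e,f,g] := by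
  rcases l with _|⟨a,_|⟨b,_|⟨c,_|⟨d,_|⟨e,_|⟨f,_|⟨g,_|⟨x,t⟩⟩⟩⟩⟩⟩⟩⟩ <;> simp_all

lemma pvLen11 (l : List Char) (h : l.length = 11) :
    ∃ a b c d e f g h1 i j k, l = [a,b,c,d,e,f,g,h1,i,j,k] := by
  rcases l with _|⟨a,_|⟨b,_|⟨c,_|⟨d,_|⟨e,_|⟨f,_|⟨g,_|⟨h1,_|⟨i,_|⟨j,_|⟨k,_|⟨x,t⟩⟩⟩⟩⟩⟩⟩⟩⟩⟩⟩⟩ <;> simp_all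

lemma pvPB_iff (l : List Char) : pvPB l = true ↔ pvShape l := by
  constructor
  · intro h
    simp only [pvPB, Bool.and_eq_true, Bool.or_eq_true, beq_iff_eq] at h
    obtain ⟨hlen, hall⟩ := h
    rcases hlen with h7 | h11
    · obtain ⟨a,b,c,d,e,f,g, rfl⟩ := pvLen7 l h7
      simp [PySem.List.enumerate_cons, PySem.Int.mod] at hall
      obtain ⟨q0, q1, q2, q3, q4, q5, q6⟩ := hall
      subst q3
      exact Or.inl ⟨a,b,c,e,f,g, rfl, ⟨q0,q1,q2⟩, ⟨q4,q5,q6⟩⟩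
    · obtain ⟨a,b,c,d,e,f,g,h1,i,j,k, rfl⟩ := pvLen11 l h11
      simp [PySem.List.enumerate_cons, PySem.Int.mod] at hall
      obtain ⟨q0, q1, q2, q3, q4, q5, q6, q7, q8, q9, q10⟩ := hall
      subst q3; subst q7
      exact Or.inr ⟨a,b,c,e,f,g,i,j,k, rfl, ⟨q0,q1,q2⟩, ⟨q4,q5,q6⟩, ⟨q8,q9,q10⟩⟩
  · rintro (⟨a,b,c,d,e,f, rfl, ⟨ha,hb,hc⟩, ⟨hd,he,hf⟩⟩ |
            ⟨a,b,c,d,e,f,g,hh,i, rfl, ⟨ha,hb,hc⟩, ⟨hd,he,hf⟩, ⟨hg,hhh,hi⟩⟩)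
    · simp [pvPB, PySem.List.enumerate_cons, PySem.Int.mod, ha, hb, hc, hd, he, hf]
    · simp [pvPB, PySem.List.enumerate_cons, PySem.Int.mod, ha, hb, hc, hd, he, hf, hg, hhh, hi]

lemma pvPA_eq_pvPB (l : List Char) : pvPA l = pvPB l := by
  cases hA : pvPA l with
  | true => exact ((pvPB_iff l).mpr ((pvPA_iff l).mp hA)).symm
  | false =>
    cases hB : pvPB l with
    | false => rfl
    | true => exact absurd ((pvPA_iff l).mpr ((pvPB_iff l).mp hB)) (by simp [hA])

-- ===== VERDICT (by name: the statement is the Claim_ definition above) =====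
theorem detect_onomatopoeia_spec : Claim_equal_detect_onomatopoeia := by
  intro word _
  unfold Spec_detect_onomatopoeia
  have hA : detect_onomatopoeia word
      = (if pvPA word.toList then true else if pvSA word.toList then true else false) := rfl
  have hB : detect_onomatopoeia_alt word
      = (if pvPB word.toList then true else pvSA word.toList) := rfl
  rw [hA, hB, pvPA_eq_pvPB]
  cases pvPB word.toList <;> cases pvSA word.toList <;> simp
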